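-- pv_equiv track=rewrite | github.com/happynow7/Algorithm | 프로그래머스/1/82612. 부족한 금액 계산하기/부족한 금액 계산하기.py | solution
-- ===== SOURCE A (Python) =====
-- def solution(price, money, count):
--     answer = 0
--     sum = 0
--     for i in range(1, count+1):
--         sum += price * i
--     if money < sum:
--         answer = sum - money
--     else:
--         answer = 0
--     return answer
-- ===== SOURCE B (Python) =====
-- def solution(price, money, count):
--     n = count if count > 0 else 0
--     total = price * n * (n + 1) // 2
--     shortfall = total - money
--     return shortfall if shortfall > 0 else 0
-- ===== Notes on version B (the rewrite author's own statement) =====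
-- stated objective: faster
-- what changed: Replaces the O(count) accumulation loop with the closed-form arithmetic-series formula price*count*(count+1)//2.
import Mathlib
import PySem

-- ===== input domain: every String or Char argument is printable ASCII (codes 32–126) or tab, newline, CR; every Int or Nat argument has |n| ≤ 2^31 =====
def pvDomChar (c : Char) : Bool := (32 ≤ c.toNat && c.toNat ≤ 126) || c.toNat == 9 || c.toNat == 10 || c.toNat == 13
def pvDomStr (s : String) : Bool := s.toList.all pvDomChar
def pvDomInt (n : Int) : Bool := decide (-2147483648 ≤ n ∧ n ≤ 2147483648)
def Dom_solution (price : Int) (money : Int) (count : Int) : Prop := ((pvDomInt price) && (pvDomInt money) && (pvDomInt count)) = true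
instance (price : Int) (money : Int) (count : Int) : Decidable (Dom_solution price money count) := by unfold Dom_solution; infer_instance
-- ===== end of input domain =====

-- B replaces A's O(count) summation loop by the closed-form arithmetic-series formula (O(1)).


-- ===== PORT A =====
-- loop 'for i in range(1, count+1): sum += price * i', then the final branch
def solution (price : Int) (money : Int) (count : Int) : Int :=
  let sum := (PySem.List.pyRange 1 (count + 1)).foldl (fun s i => s + price * i) 0
  if money < sum then sum - money else 0

-- ===== PORT B =====
def solution_alt (price : Int) (money : Int) (count : Int) : Int :=
  let n := if count > 0 then count else 0
  let total := PySem.Int.floordiv (price * n * (n + 1)) 2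
  let shortfall := total - money
  if shortfall > 0 then shortfall else 0

-- ===== PRECONDITION & SPEC =====
def Spec_solution (price : Int) (money : Int) (count : Int) (out : Int) : Prop := out = solution_alt price money count
instance (price : Int) (money : Int) (count : Int) (out : Int) : Decidable (Spec_solution price money count out) := by unfold Spec_solution; infer_instance

-- ===== CLAIM (what is proved, stated in full; the proofs are below) =====
def Claim_equal_solution : Prop := ∀ (price : Int) (money : Int) (count : Int), Dom_solution price money count → Spec_solution price money count (solution price money count)

-- ===== LEMMAS AND PROOFS =====

theorem pyRange_nil_of_le {a b : Int} (h : b ≤ a) : PySem.List.pyRange a b = [] := by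
  simp [PySem.List.pyRange]
  intro _
  omega

theorem sum_loop_formula (price : Int) : ∀ (k : Nat),
    (PySem.List.pyRange 1 ((k : Int) + 1)).foldl (fun s i => s + price * i) 0
      = PySem.Int.floordiv (price * (k : Int) * ((k : Int) + 1)) 2 := by
  intro k
  induction k with
  | zero =>
      rw [pyRange_nil_of_le (by norm_num)]
      rw [PySem.Int.floordiv_eq_ediv_of_pos (by norm_num)]
      simp
  | succ k ih =>
      have h1 : ((k + 1 : Nat) : Int) + 1 = ((k : Int) + 1) + 1 := by push_cast; ring
      rw [h1, PySem.List.pyRange_one_succ_right (by omega)]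
      rw [List.foldl_append, ih]
      simp only [List.foldl]
      rw [PySem.Int.floordiv_eq_ediv_of_pos (by norm_num),
          PySem.Int.floordiv_eq_ediv_of_pos (by norm_num)]
      have h2 : price * ((k + 1 : Nat) : Int) * ((k : Int) + 1 + 1)
          = price * (k : Int) * ((k : Int) + 1) + price * ((k : Int) + 1) * 2 := by
        push_cast; ring
      rw [h2, Int.add_mul_ediv_right _ _ (by norm_num)]

-- ===== VERDICT (by name: the statement is the Claim_ definition above) =====
theorem solution_spec : Claim_equal_solution := by
  intro price money count _
  unfold Spec_solution solution solution_alt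
  by_cases hc : count > 0
  · have hk : ((count.toNat : Nat) : Int) = count := Int.toNat_of_nonneg (le_of_lt hc)
    have := sum_loop_formula price count.toNat
    rw [hk] at this
    simp only [this, if_pos hc]
    split_ifs <;> omega
  · rw [pyRange_nil_of_le (by omega)]
    simp only [List.foldl_nil, if_neg hc]
    rw [PySem.Int.floordiv_eq_ediv_of_pos (by norm_num)]
    simp only [mul_zero, zero_mul, Int.zero_ediv]
    split_ifs <;> omega
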